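-- pv_equiv track=rewrite | github.com/hasmelkonyan/big-number | big_number.py | str_to_lst
-- ===== SOURCE A (Python) =====
-- def div_by_three(str):
--     len_str = len(str)
--     if len_str % 3 == 1:
--         str = "00" + str
--     elif len_str % 3 == 2:
--         str = "0" + str
--     return str
--
-- def str_to_lst(my_str):
--     lst = []
--     my_str = div_by_three(my_str)
--     i = 0
--     while i < len(my_str):
--         lst.append((my_str[i: i + 3]))
--         i += 3
--     return lst
-- ===== SOURCE B (Python) =====
-- def str_to_lst(my_str):
--     lst = []
--     while len(my_str) > 3:
--         lst.insert(0, my_str[-3:])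
--         my_str = my_str[:-3]
--     if my_str:
--         lst.insert(0, my_str.rjust(3, '0'))
--     return lst
-- ===== Notes on version B (the rewrite author's own statement) =====
-- stated objective: alternative
-- what changed: B never pads up front: it peels 3-char chunks off the right end of the string, prepending each, and zero-fills only the final leftover chunk, instead of A's prepend-zeros-then-forward-slice loop.
import Mathlib
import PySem

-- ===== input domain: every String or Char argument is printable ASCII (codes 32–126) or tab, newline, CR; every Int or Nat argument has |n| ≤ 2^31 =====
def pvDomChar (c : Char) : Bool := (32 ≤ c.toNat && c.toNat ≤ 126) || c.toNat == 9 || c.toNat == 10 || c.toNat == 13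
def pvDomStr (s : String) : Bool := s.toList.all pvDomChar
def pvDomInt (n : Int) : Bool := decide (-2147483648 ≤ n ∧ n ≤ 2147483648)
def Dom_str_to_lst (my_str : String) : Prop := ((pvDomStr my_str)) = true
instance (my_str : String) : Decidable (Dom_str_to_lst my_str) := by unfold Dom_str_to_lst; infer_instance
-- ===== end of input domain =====

-- B builds the chunk list by peeling 3-char chunks off the RIGHT end and zero-filling only the
-- final leftover, instead of A's pad-up-front-then-forward-slice loop (objective: alternative).

-- ===== PORT A =====
-- A's helper div_by_three: prepend "00" / "0" according to len % 3 (over List Char)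
def div_by_three (s : List Char) : List Char :=
  if s.length % 3 = 1 then '0' :: '0' :: s
  else if s.length % 3 = 2 then '0' :: s
  else s

-- A's while loop: i advances by 3, appending my_str[i:i+3]; as structural recursion on the
-- remaining suffix (s[i:i+3] = take 3 of the suffix, i += 3 = drop 3).
def chunkFwd (cs : List Char) : List String :=
  if cs = [] then []
  else String.mk (cs.take 3) :: chunkFwd (cs.drop 3)
termination_by cs.length
decreasing_by
  rename_i h
  have : cs.length ≠ 0 := by simpa [List.length_eq_zero_iff] using h
  simp [List.length_drop]; omega

def str_to_lst (my_str : String) : List String :=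
  chunkFwd (div_by_three my_str.toList)

-- ===== PORT B =====
-- while len > 3: prepend the last 3 chars, cut them off; then rjust(3,'0') the leftover.
def chunkRev (cs : List Char) : List String :=
  if h : cs.length > 3 then
    chunkRev (cs.take (cs.length - 3)) ++ [String.mk (cs.drop (cs.length - 3))]
  else if cs = [] then []
  else [String.mk (List.replicate (3 - cs.length) '0' ++ cs)]
termination_by cs.length
decreasing_by simp [List.length_take]; omega

def str_to_lst_alt (my_str : String) : List String :=
  chunkRev my_str.toList

-- ===== PRECONDITION & SPEC =====
def Spec_str_to_lst (my_str : String) (out : List String) : Prop := out = str_to_lst_alt my_str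
instance (my_str : String) (out : List String) : Decidable (Spec_str_to_lst my_str out) := by unfold Spec_str_to_lst; infer_instance

-- ===== CLAIM (what is proved, stated in full; the proofs are below) =====
def Claim_equal_str_to_lst : Prop := ∀ (my_str : String), Dom_str_to_lst my_str → Spec_str_to_lst my_str (str_to_lst my_str)

-- ===== LEMMAS AND PROOFS =====

lemma chunkFwd_nil : chunkFwd [] = [] := by simp [chunkFwd]

lemma chunkFwd_cons (cs : List Char) (h : cs ≠ []) :
    chunkFwd cs = String.mk (cs.take 3) :: chunkFwd (cs.drop 3) := by
  rw [chunkFwd]; simp [h]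

lemma chunkFwd_three (ds : List Char) (h : ds.length = 3) :
    chunkFwd ds = [String.mk ds] := by
  have hne : ds ≠ [] := by intro he; simp [he] at h
  rw [chunkFwd_cons ds hne]
  have h1 : ds.take 3 = ds := List.take_of_length_le (by omega)
  have h2 : ds.drop 3 = [] := by
    apply List.eq_nil_of_length_eq_zero; simp [List.length_drop]; omega
  simp [h1, h2, chunkFwd_nil]

-- last-chunk peeling of the forward chunker, by induction over full 3-chunks of ds
lemma chunkFwd_append3 (n : ℕ) (ds e : List Char) (hd : ds.length ≤ n)
    (h3 : ds.length % 3 = 0) (he : e.length = 3) :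
    chunkFwd (ds ++ e) = chunkFwd ds ++ [String.mk e] := by
  induction n generalizing ds with
  | zero =>
    have : ds = [] := by apply List.eq_nil_of_length_eq_zero; omega
    subst this; simp [chunkFwd_nil, chunkFwd_three e he]
  | succ n ih =>
    by_cases hnil : ds = []
    · subst hnil; simp [chunkFwd_nil, chunkFwd_three e he]
    · have hlen : 3 ≤ ds.length := by
        have : ds.length ≠ 0 := by simpa [List.length_eq_zero_iff] using hnil
        omega
      have hne : ds ++ e ≠ [] := by simp [hnil]
      rw [chunkFwd_cons _ hne, chunkFwd_cons ds hnil]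
      have ht : (ds ++ e).take 3 = ds.take 3 := List.take_append_of_le_length hlen
      have hdr : (ds ++ e).drop 3 = ds.drop 3 ++ e := List.drop_append_of_le_length hlen
      rw [ht, hdr, ih (ds.drop 3) (by simp [List.length_drop]; omega)
        (by simp [List.length_drop]; omega)]
      simp

lemma chunkRev_small (cs : List Char) (h : cs.length ≤ 3) (hne : cs ≠ []) :
    chunkRev cs = [String.mk (List.replicate (3 - cs.length) '0' ++ cs)] := by
  rw [chunkRev]; simp [Nat.not_lt.mpr h, hne]

lemma chunkRev_big (cs : List Char) (h : cs.length > 3) :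
    chunkRev cs = chunkRev (cs.take (cs.length - 3)) ++ [String.mk (cs.drop (cs.length - 3))] := by
  rw [chunkRev]; simp [h]

lemma pad_eq_replicate (cs : List Char) (h1 : 1 ≤ cs.length) (h3 : cs.length ≤ 3) :
    div_by_three cs = List.replicate (3 - cs.length) '0' ++ cs := by
  unfold div_by_three
  interval_cases h : cs.length <;> simp_all [List.replicate]

lemma main_lemma (n : ℕ) : ∀ cs : List Char, cs.length ≤ n →
    chunkFwd (div_by_three cs) = chunkRev cs := by
  induction n with
  | zero =>
    intro cs h
    have : cs = [] := by apply List.eq_nil_of_length_eq_zero; omega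
    subst this
    rw [chunkRev]; simp [div_by_three, chunkFwd_nil]
  | succ n ih =>
    intro cs hle
    by_cases hbig : cs.length > 3
    · -- peel the last 3 characters
      set f := cs.take (cs.length - 3) with hf
      set e := cs.drop (cs.length - 3) with he
      have hfl : f.length = cs.length - 3 := by simp [hf, List.length_take]
      have hel : e.length = 3 := by simp [he, List.length_drop]; omega
      have hsplit : cs = f ++ e := (List.take_append_drop _ cs).symm
      have hmod : f.length % 3 = cs.length % 3 := by omega
      have hpad : div_by_three cs = div_by_three f ++ e := by
        unfold div_by_three
        rw [hmod]
        split_ifs <;> simp [hsplit]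
      have hpadmod : (div_by_three f).length % 3 = 0 := by
        unfold div_by_three
        split_ifs with h1 h2
        · simp only [List.length_cons]; omega
        · simp only [List.length_cons]; omega
        · omega
      rw [hpad, chunkFwd_append3 ((div_by_three f).length) (div_by_three f) e le_rfl hpadmod hel]
      rw [chunkRev_big cs hbig, ← hf, ← he]
      rw [ih f (by omega)]
    · by_cases hnil : cs = []
      · subst hnil
        rw [chunkRev]; simp [div_by_three, chunkFwd_nil]
      · have h1 : 1 ≤ cs.length := by
          have : cs.length ≠ 0 := by simpa [List.length_eq_zero_iff] using hnil
          omega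
        rw [pad_eq_replicate cs h1 (by omega), chunkRev_small cs (by omega) hnil]
        apply chunkFwd_three
        simp only [List.length_append, List.length_replicate]; omega

-- ===== VERDICT (by name: the statement is the Claim_ definition above) =====
theorem str_to_lst_spec : Claim_equal_str_to_lst := by
  intro my_str _
  unfold Spec_str_to_lst str_to_lst str_to_lst_alt
  exact main_lemma my_str.toList.length my_str.toList le_rfl
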